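-- pv_equiv track=rewrite | github.com/thelpix/tareaIP | Python/guia7.py | letras_distintas_3
-- ===== SOURCE A (Python) =====
-- def borrar_repetidas(palabra: str, letra: str) -> str: #borra todas y reposiciona la letra en la ultima posicion, ej: "hola" -> "olah"
--     nueva_palabra : str = ""
--     for i in range(len(palabra)):
--         if palabra[i] != letra:
--             nueva_palabra += palabra[i]
--     nueva_palabra += letra
--     return nueva_palabra
--
-- def letras_distintas_3(palabra: str) -> bool:
--     palabra_original : str = palabra
--     for i in range(len(palabra_original)):
--         palabra = borrar_repetidas(palabra, palabra_original[i]) ##borrar todas las letras repetidas dejando 1 sola, para contar las distintas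
--     if len(palabra) >= 3:
--         return True
--     else:
--         return False
-- ===== SOURCE B (Python) =====
-- def letras_distintas_3(palabra: str) -> bool:
--     seen = set()
--     for ch in palabra:
--         seen.add(ch)
--         if len(seen) >= 3:
--             return True
--     return False
-- ===== Notes on version B (the rewrite author's own statement) =====
-- stated objective: faster
-- what changed: B makes a single forward pass maintaining a running set and returns True as soon as the third distinct character is seen, instead of A's repeated full-string rebuild (delete-all-and-reappend) per character followed by a final length check.
import Mathlib
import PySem

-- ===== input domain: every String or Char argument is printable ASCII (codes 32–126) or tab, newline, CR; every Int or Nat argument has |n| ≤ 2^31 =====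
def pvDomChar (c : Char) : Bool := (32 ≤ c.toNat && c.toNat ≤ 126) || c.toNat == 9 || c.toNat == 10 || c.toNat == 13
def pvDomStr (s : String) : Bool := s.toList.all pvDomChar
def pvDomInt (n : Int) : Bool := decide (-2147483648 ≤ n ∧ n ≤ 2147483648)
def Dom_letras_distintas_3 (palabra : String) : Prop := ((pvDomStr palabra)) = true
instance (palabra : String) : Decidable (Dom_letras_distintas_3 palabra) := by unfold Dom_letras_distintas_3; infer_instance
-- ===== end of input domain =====

-- B replaces A's per-character full rebuild of the string by a single forward pass over
-- a running set with an early return at the third distinct character (objective: faster).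

-- ===== PORT A =====
def borrar_repetidas (palabra : List Char) (letra : Char) : List Char :=
  (palabra.foldl (fun nueva c => if c ≠ letra then nueva ++ [c] else nueva) []) ++ [letra]

def letras_distintas_3 (palabra : String) : Bool :=
  let palabra_original := palabra.toList
  let final := palabra_original.foldl (fun p c => borrar_repetidas p c) palabra_original
  if 3 ≤ final.length then true else false

-- ===== PORT B =====
def altLoop (seen : PySem.Set Char) : List Char → Bool
  | [] => false
  | c :: rest =>
    let seen' := PySem.Set.add seen c
    if 3 ≤ seen'.length then true else altLoop seen' rest

def letras_distintas_3_alt (palabra : String) : Bool :=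
  altLoop PySem.Set.empty palabra.toList

-- ===== PRECONDITION & SPEC =====
def Spec_letras_distintas_3 (palabra : String) (out : Bool) : Prop := out = letras_distintas_3_alt palabra
instance (palabra : String) (out : Bool) : Decidable (Spec_letras_distintas_3 palabra out) := by unfold Spec_letras_distintas_3; infer_instance

-- ===== CLAIM (what is proved, stated in full; the proofs are below) =====
def Claim_equal_letras_distintas_3 : Prop := ∀ (palabra : String), Dom_letras_distintas_3 palabra → Spec_letras_distintas_3 palabra (letras_distintas_3 palabra)

-- ===== LEMMAS AND PROOFS =====

-- A's inner rebuild is "remove every copy of letra, then append one copy".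
theorem borrar_eq_filter (p : List Char) (c : Char) :
    borrar_repetidas p c = p.filter (· ≠ c) ++ [c] := by
  unfold borrar_repetidas
  rw [PySem.List.foldl_append_ite_eq_filter]
  simp

-- membership is preserved/accumulated by A's outer loop
theorem mem_foldA (l : List Char) (p : List Char) (a : Char) :
    a ∈ l.foldl (fun p c => borrar_repetidas p c) p ↔ a ∈ p ∨ a ∈ l := by
  induction l generalizing p with
  | nil => simp
  | cons c l ih =>
    rw [List.foldl_cons, ih]
    have hm : a ∈ borrar_repetidas p c ↔ a ∈ p ∨ a = c := by
      rw [borrar_eq_filter]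
      by_cases h : a = c <;> simp [h]
    rw [hm, List.mem_cons]
    tauto

-- characters not processed keep their multiplicity
theorem count_foldA_not_mem (l : List Char) (p : List Char) (a : Char) (h : a ∉ l) :
    (l.foldl (fun p c => borrar_repetidas p c) p).count a = p.count a := by
  induction l generalizing p with
  | nil => rfl
  | cons c l ih =>
    have hac : a ≠ c := fun hh => h (hh ▸ List.mem_cons_self)
    rw [List.foldl_cons, ih _ (fun hh => h (List.mem_cons_of_mem _ hh)),
      borrar_eq_filter]
    simp [List.count_append, List.count_filter, hac, Ne.symm hac]

-- every processed character ends with multiplicity exactly 1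
theorem count_foldA_mem (l : List Char) (p : List Char) (a : Char) (h : a ∈ l) :
    (l.foldl (fun p c => borrar_repetidas p c) p).count a = 1 := by
  induction l generalizing p with
  | nil => cases h
  | cons c l ih =>
    rw [List.foldl_cons]
    by_cases hl : a ∈ l
    · exact ih _ hl
    · have hac : a = c := by rcases List.mem_cons.mp h with h | h; exact h; exact absurd h hl
      rw [count_foldA_not_mem _ _ _ hl, borrar_eq_filter]
      simp only [List.count_append, hac]
      have : List.count c (List.filter (fun x => !decide (x = c)) p) = 0 := by
        simp [List.count_eq_zero]
      simp [this]

-- hence A's final string is a duplicate-free enumeration of the word's characters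
theorem foldA_nodup (l : List Char) :
    (l.foldl (fun p c => borrar_repetidas p c) l).Nodup := by
  rw [List.nodup_iff_count_le_one]
  intro a
  by_cases h : a ∈ l
  · rw [count_foldA_mem _ _ _ h]
  · rw [count_foldA_not_mem _ _ _ h, List.count_eq_zero_of_not_mem h]; omega

theorem foldA_length (l : List Char) :
    (l.foldl (fun p c => borrar_repetidas p c) l).length = (PySem.List.dedup l).length := by
  refine List.Perm.length_eq ?_
  refine (List.perm_ext_iff_of_nodup (foldA_nodup l) (PySem.List.nodup_dedup l)).mpr ?_
  intro a
  rw [mem_foldA, PySem.List.mem_dedup]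
  tauto

-- adding to a set never shrinks it; folding adds never shrinks it
theorem length_le_add (s : PySem.Set Char) (c : Char) :
    s.length ≤ (PySem.Set.add s c).length := by
  unfold PySem.Set.add
  split <;> simp

theorem length_le_foldl_add (l : List Char) (s : PySem.Set Char) :
    s.length ≤ (l.foldl PySem.Set.add s).length := by
  induction l generalizing s with
  | nil => simp
  | cons c l ih => exact le_trans (length_le_add s c) (ih _)

-- B's loop decides whether the accumulated set ever reaches 3 elements
theorem altLoop_eq (l : List Char) (s : PySem.Set Char) (hs : s.length < 3) :
    altLoop s l = decide (3 ≤ (l.foldl PySem.Set.add s).length) := by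
  induction l generalizing s with
  | nil => simp [altLoop]; omega
  | cons c l ih =>
    rw [altLoop, List.foldl_cons]
    by_cases h : 3 ≤ (PySem.Set.add s c).length
    · have := length_le_foldl_add l (PySem.Set.add s c)
      simp only [h, if_true]
      symm; simp; omega
    · rw [if_neg h, ih _ (by omega)]

theorem alt_eq_dedup (palabra : String) :
    letras_distintas_3_alt palabra = decide (3 ≤ (PySem.List.dedup palabra.toList).length) := by
  unfold letras_distintas_3_alt
  rw [altLoop_eq _ _ (by simp [PySem.Set.empty])]
  rw [PySem.List.dedup_eq_ofList, PySem.Set.ofList_eq_foldl]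
  simp [PySem.Set.empty]

-- ===== VERDICT (by name: the statement is the Claim_ definition above) =====
theorem letras_distintas_3_spec : Claim_equal_letras_distintas_3 := by
  intro palabra _
  unfold Spec_letras_distintas_3
  rw [alt_eq_dedup]
  simp only [letras_distintas_3]
  rw [foldA_length]
  split_ifs with h <;> simp_all
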